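-- pv_equiv track=rewrite | github.com/sachduce/Competitive-Coding | CodeChef/Feb Long Challenge/NOCHANGEGRAPH.py | processCombination
-- ===== SOURCE A (Python) =====
-- def processCombination(combination, amount, p):
--     coinDic = {}
--
--     for i in range(len(combination) -1):
--         v = combination[i] -combination[i+1]
--
--         if(amount - v >= p):
--             return None
--
--         if( v in coinDic ):
--             coinDic[v] +=1
--         else:
--             coinDic[v] = 1
--
--     return coinDic
-- ===== SOURCE B (Python) =====
-- def processCombination(combination, amount, p):
--     diffs = [combination[i] - combination[i + 1] for i in range(len(combination) - 1)]
--     if any(amount - v >= p for v in diffs):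
--         return None
--     coinDic = {}
--     for v in diffs:
--         coinDic[v] = coinDic.get(v, 0) + 1
--     return coinDic
-- ===== Notes on version B (the rewrite author's own statement) =====
-- stated objective: simpler
-- what changed: Replaces A's single interleaved loop (compute diff, early-return, branch on membership to update the dict) by a check-then-count decomposition: build the diff list once, guard with any(), then count with dict.get in a separate loop.
import Mathlib
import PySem

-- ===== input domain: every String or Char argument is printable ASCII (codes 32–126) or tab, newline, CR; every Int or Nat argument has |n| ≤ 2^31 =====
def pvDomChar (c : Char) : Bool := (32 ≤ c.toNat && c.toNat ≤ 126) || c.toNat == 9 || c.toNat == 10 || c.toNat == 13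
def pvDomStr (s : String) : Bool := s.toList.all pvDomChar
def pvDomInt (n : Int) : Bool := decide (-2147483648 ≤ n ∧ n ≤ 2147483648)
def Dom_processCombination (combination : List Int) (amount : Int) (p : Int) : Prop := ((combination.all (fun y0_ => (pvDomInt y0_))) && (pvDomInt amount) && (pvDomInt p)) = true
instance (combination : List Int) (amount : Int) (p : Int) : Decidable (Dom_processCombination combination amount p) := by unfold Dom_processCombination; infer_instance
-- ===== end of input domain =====

-- B replaces A's single interleaved early-exit loop by a check-then-count decomposition
-- over a precomputed diff list (objective: simpler); return values agree everywhere.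


-- ===== PORT A =====
-- A's for-loop over range(len-1) with its early 'return None'; indices i and i+1 are
-- always in range for i drawn from this range, so pyGetD with default 0 is exact here.
def pcLoopA (combination : List Int) (amount p : Int) :
    List Int → PySem.Dict Int Int → Option (PySem.Dict Int Int)
  | [], d => some d
  | i :: rest, d =>
    let v := PySem.List.pyGetD combination i 0 - PySem.List.pyGetD combination (i + 1) 0
    if amount - v ≥ p then none
    else pcLoopA combination amount p rest
      (if d.contains v then d.modify v 0 (· + 1) else d.insert v 1)

def processCombination (combination : List Int) (amount : Int) (p : Int) : Option (List (Int × Int)) :=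
  (pcLoopA combination amount p
      (PySem.List.pyRange 0 (PySem.List.len combination - 1) 1) PySem.Dict.empty).map (·.items)

-- ===== PORT B =====
def processCombination_alt (combination : List Int) (amount : Int) (p : Int) : Option (List (Int × Int)) :=
  let diffs := (PySem.List.pyRange 0 (PySem.List.len combination - 1) 1).map
    (fun i => PySem.List.pyGetD combination i 0 - PySem.List.pyGetD combination (i + 1) 0)
  if diffs.any (fun v => decide (amount - v ≥ p)) then none
  else some ((diffs.foldl (fun d v => d.insert v (d.getD v 0 + 1)) PySem.Dict.empty).items)

-- ===== PRECONDITION & SPEC =====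
def Spec_processCombination (combination : List Int) (amount : Int) (p : Int) (out : Option (List (Int × Int))) : Prop := out = processCombination_alt combination amount p
instance (combination : List Int) (amount : Int) (p : Int) (out : Option (List (Int × Int))) : Decidable (Spec_processCombination combination amount p out) := by unfold Spec_processCombination; infer_instance

-- ===== CLAIM (what is proved, stated in full; the proofs are below) =====
def Claim_equal_processCombination : Prop := ∀ (combination : List Int) (amount : Int) (p : Int), Dom_processCombination combination amount p → Spec_processCombination combination amount p (processCombination combination amount p)

-- ===== LEMMAS AND PROOFS =====

-- A's two-branch dict update equals B's single get-default update.
theorem stepA_eq_stepB (d : PySem.Dict Int Int) (v : Int) :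
    (if d.contains v then d.modify v 0 (· + 1) else d.insert v 1)
      = d.insert v (d.getD v 0 + 1) := by
  by_cases h : d.contains v = true
  · simp [h, PySem.Dict.modify]
  · simp only [Bool.not_eq_true] at h
    simp [h, PySem.Dict.getD_of_not_contains _ _ h]

-- A's interleaved loop equals the check-then-count on the mapped diff list.
theorem loopA_check_count (amount p : Int) (combination : List Int)
    (idxs : List Int) (d : PySem.Dict Int Int) :
    pcLoopA combination amount p idxs d =
      (let diffs := idxs.map (fun i => PySem.List.pyGetD combination i 0 - PySem.List.pyGetD combination (i + 1) 0)
       if diffs.any (fun v => decide (amount - v ≥ p)) then none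
       else some (diffs.foldl (fun d v => d.insert v (d.getD v 0 + 1)) d)) := by
  induction idxs generalizing d with
  | nil => simp [pcLoopA]
  | cons i rest ih =>
    simp only [pcLoopA, List.map_cons, List.any_cons, List.foldl_cons]
    by_cases hb : amount - (PySem.List.pyGetD combination i 0 - PySem.List.pyGetD combination (i + 1) 0) ≥ p
    · simp [hb]
    · simp only [hb, if_false]
      rw [ih, stepA_eq_stepB]
      simp

-- ===== VERDICT (by name: the statement is the Claim_ definition above) =====
theorem processCombination_spec : Claim_equal_processCombination := by
  intro combination amount p _
  unfold Spec_processCombination processCombination processCombination_alt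
  rw [loopA_check_count]
  dsimp only
  split <;> rfl
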